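-- pv_equiv track=rewrite | github.com/981377660LMT/algorithm-study | 11_动态规划/经典题/字典dp/823. 带因子的二叉树.py | numFactoredBinaryTrees2
-- ===== SOURCE A (Python) =====
-- from functools import lru_cache
-- from typing import List
--
-- MOD = int(1e9 + 7)
--
-- def numFactoredBinaryTrees2(arr: List[int]) -> int:
--     @lru_cache(None)
--     def dfs(index: int) -> int:
--         res = 1
--         for left in range(index):
--             if arr[index] % arr[left] == 0:
--                 right = arr[index] // arr[left]
--                 if right in indexMap:
--                     res += dfs(indexMap[right]) * dfs(left)
--                     res %= MOD
--         return res % MOD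
--
--     n = len(arr)
--     arr.sort()
--     indexMap = {num: i for i, num in enumerate(arr)}
--     return sum(dfs(i) for i in range(n)) % MOD
-- ===== SOURCE B (Python) =====
-- MOD = int(1e9 + 7)
--
-- def numFactoredBinaryTrees2(arr):
--     # bottom-up DP table filled in order of increasing factor magnitude
--     # (every proper factor has smaller absolute value, so all dependencies
--     # are already computed), instead of A's lru_cache top-down recursion.
--     # Sorts arr in place, like A.
--     arr.sort()
--     n = len(arr)
--     indexMap = {num: i for i, num in enumerate(arr)}
--     order = sorted(range(n), key=lambda i: (abs(arr[i]), i))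
--     dp = [1] * n
--     for i in order:
--         cur = 1
--         for left in range(i):
--             if arr[i] % arr[left] == 0:
--                 j = indexMap.get(arr[i] // arr[left])
--                 if j is not None:
--                     cur = (cur + dp[left] * dp[j]) % MOD
--         dp[i] = cur
--     return sum(dp) % MOD
-- ===== Notes on version B (the rewrite author's own statement) =====
-- stated objective: alternative
-- what changed: Replaces the lru_cache top-down recursion by an explicit bottom-up dp-array fill scheduled in order of increasing absolute value (a topological order of the factor dependencies), with the same recurrence and modular reduction.
import Mathlib
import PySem

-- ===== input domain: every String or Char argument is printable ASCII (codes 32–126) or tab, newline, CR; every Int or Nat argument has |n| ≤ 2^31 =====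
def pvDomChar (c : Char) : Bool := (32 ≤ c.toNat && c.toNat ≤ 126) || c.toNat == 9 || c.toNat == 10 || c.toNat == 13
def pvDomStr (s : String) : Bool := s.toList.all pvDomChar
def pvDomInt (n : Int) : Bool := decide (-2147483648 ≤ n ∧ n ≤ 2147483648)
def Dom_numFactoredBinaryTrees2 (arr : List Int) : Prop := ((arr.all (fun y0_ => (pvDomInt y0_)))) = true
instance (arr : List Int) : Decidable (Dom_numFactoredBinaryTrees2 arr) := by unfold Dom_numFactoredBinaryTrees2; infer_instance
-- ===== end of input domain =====

-- B replaces A's memoized top-down recursion by a bottom-up dp-array fill scheduled in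
-- order of increasing absolute value (same recurrence); both sort arr in place in
-- Python — the equivalence proved here is about the RETURN value only.

-- ===== PORT A =====
def pvMOD : Int := 1000000007

-- arr[k] for indices that are always in range in this program (0 ≤ k < len): exact as getD
def pvGetA (xs : List Int) (k : Nat) : Int := xs.getD k 0

-- indexMap = {num: i for i, num in enumerate(arr)}
def pvIndexMapA (s : List Int) : PySem.Dict Int Int :=
  (PySem.List.enumerate s 0).foldl (fun d p => d.insert p.2 p.1) PySem.Dict.empty

-- dfs with fuel (Python's recursion; under Pre_ every recursive call has a strictly
-- smaller (|value|, index) key, so fuel = n at the top level is exact)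
def pvDfsA (s : List Int) (m : PySem.Dict Int Int) : Nat → Nat → Int
  | 0, _ => 0
  | fuel + 1, index =>
    let res := (List.range index).foldl (fun res left =>
      if PySem.Int.mod (pvGetA s index) (pvGetA s left) = 0 then
        -- right = arr[index] // arr[left], inlined into the lookup
        match PySem.Dict.get? m (PySem.Int.floordiv (pvGetA s index) (pvGetA s left)) with
        | some j => PySem.Int.mod (res + pvDfsA s m fuel j.toNat * pvDfsA s m fuel left) pvMOD
        | none => res
      else res) 1
    PySem.Int.mod res pvMOD

def numFactoredBinaryTrees2 (arr : List Int) : Int :=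
  let n := arr.length
  let s := PySem.List.sorted arr (fun x => x) false
  let m := pvIndexMapA s
  PySem.Int.mod ((List.range n).foldl (fun acc i => acc + pvDfsA s m n i) 0) pvMOD

-- ===== PORT B =====
def pvModB : Int := 1000000007

def pvAtB (xs : List Int) (k : Nat) : Int := xs.getD k 0

def pvIndexMapB (s : List Int) : PySem.Dict Int Int :=
  (PySem.List.enumerate s 0).foldl (fun d p => d.insert p.2 p.1) PySem.Dict.empty

-- order = sorted(range(n), key=lambda i: (abs(arr[i]), i))
def pvOrderB (s : List Int) (n : Nat) : List Nat :=
  PySem.List.sorted2 (List.range n) (fun i => (s.getD i 0).natAbs) (fun i => i) false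

-- the inner 'for left in range(i)' loop of B, computing cur from the current dp array
def pvCurB (s : List Int) (m : PySem.Dict Int Int) (dp : List Int) (i : Nat) : Int :=
  (List.range i).foldl (fun cur left =>
    if PySem.Int.mod (pvAtB s i) (pvAtB s left) = 0 then
      match PySem.Dict.get? m (PySem.Int.floordiv (pvAtB s i) (pvAtB s left)) with
      | some j => PySem.Int.mod (cur + pvAtB dp left * pvAtB dp j.toNat) pvModB
      | none => cur
    else cur) 1

def numFactoredBinaryTrees2_alt (arr : List Int) : Int :=
  let s := PySem.List.sorted arr (fun x => x) false
  let n := arr.length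
  let m := pvIndexMapB s
  let dp := (pvOrderB s n).foldl (fun dp i => dp.set i (pvCurB s m dp i)) (List.replicate n 1)
  PySem.Int.mod (dp.foldl (fun acc x => acc + x) 0) pvModB

-- ===== PRECONDITION & SPEC =====
-- Pre_ excludes exactly the inputs on which A RAISES: a 0 together with any other element
-- (ZeroDivisionError or self-referential recursion), and a 1 together with a duplicate 1,
-- an element larger than 1, or a duplicated -1 (each makes A's memoized recursion call
-- itself, RecursionError). A returns normally on every input satisfying Pre_.
def Pre_numFactoredBinaryTrees2 (arr : List Int) : Prop :=
  ((0 : Int) ∈ arr → arr.length ≤ 1) ∧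
  ((1 : Int) ∈ arr → arr.count 1 = 1 ∧ (∀ x ∈ arr, x ≤ 1) ∧ arr.count (-1) ≤ 1)

instance (arr : List Int) : Decidable (Pre_numFactoredBinaryTrees2 arr) := by
  unfold Pre_numFactoredBinaryTrees2; infer_instance

def pvWitness_numFactoredBinaryTrees2 : List Int := [4, 2, 8, 5, 16]

def Spec_numFactoredBinaryTrees2 (arr : List Int) (out : Int) : Prop := out = numFactoredBinaryTrees2_alt arr
instance (arr : List Int) (out : Int) : Decidable (Spec_numFactoredBinaryTrees2 arr out) := by unfold Spec_numFactoredBinaryTrees2; infer_instance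

-- ===== CLAIM (what is proved, stated in full; the proofs are below) =====
def Claim_equal_numFactoredBinaryTrees2 : Prop := ∀ (arr : List Int), Dom_numFactoredBinaryTrees2 arr → Pre_numFactoredBinaryTrees2 arr → Spec_numFactoredBinaryTrees2 arr (numFactoredBinaryTrees2 arr)

-- ===== LEMMAS AND PROOFS =====

-- the lexicographic (|s[i]|, i) key that schedules B's fill order
def pvKey (s : List Int) (i : Nat) : Lex (Nat × Nat) := toLex ((s.getD i 0).natAbs, i)

-- B's order is sorted(range n) under the lexicographic key
theorem pvOrderB_eq_sorted (s : List Int) (n : Nat) :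
    pvOrderB s n = PySem.List.sorted (List.range n) (pvKey s) false := by
  rw [PySem.List.sorted_eq_foldl_insertBy]
  show (List.range n).foldl (fun acc x => PySem.List.insertBy _ x acc) [] = _
  have hcomp : (fun (a b : Nat) =>
        decide ((s.getD a 0).natAbs < (s.getD b 0).natAbs) ||
          (!decide ((s.getD b 0).natAbs < (s.getD a 0).natAbs) && decide (a < b)))
      = fun a b => decide (pvKey s a < pvKey s b) := by
    funext a b
    have hiff : (pvKey s a < pvKey s b) ↔
        ((s.getD a 0).natAbs < (s.getD b 0).natAbs ∨
          ((s.getD a 0).natAbs = (s.getD b 0).natAbs ∧ a < b)) := by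
      rw [pvKey, pvKey, Prod.Lex.lt_iff]; simp
    rw [Bool.eq_iff_iff]
    simp only [Bool.or_eq_true, Bool.and_eq_true, Bool.not_eq_true', decide_eq_true_eq,
      decide_eq_false_iff_not]
    rw [hiff]
    omega
  rw [hcomp]
  simp

-- every value stored in the index map is an index of that key in s
theorem pvMapFoldInv (s : List Int) (l : List (Int × Int)) (d : PySem.Dict Int Int)
    (hl : ∀ p ∈ l, ∃ k : Nat, p.1 = (k : Int) ∧ k < s.length ∧ s.getD k 0 = p.2)
    (hd : ∀ v j, d.get? v = some j → ∃ k : Nat, j = (k : Int) ∧ k < s.length ∧ s.getD k 0 = v) :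
    ∀ v j, (l.foldl (fun d p => d.insert p.2 p.1) d).get? v = some j →
      ∃ k : Nat, j = (k : Int) ∧ k < s.length ∧ s.getD k 0 = v := by
  induction l generalizing d with
  | nil => exact hd
  | cons p t ih =>
    intro v j h
    refine ih (d.insert p.2 p.1) (fun q hq => hl q (List.mem_cons_of_mem _ hq)) ?_ v j h
    intro v' j' h'
    rw [PySem.Dict.get?_insert] at h'
    by_cases hv : v' = p.2
    · simp [hv] at h'
      obtain ⟨k, hk1, hk2, hk3⟩ := hl p (List.mem_cons_self ..)
      exact ⟨k, by omega, hk2, by rw [hk3]; exact hv.symm⟩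
    · simp [hv] at h'
      exact hd v' j' h'

theorem pvIndexMapA_sound (s : List Int) (v j : Int)
    (h : (pvIndexMapA s).get? v = some j) :
    ∃ k : Nat, j = (k : Int) ∧ k < s.length ∧ s.getD k 0 = v := by
  refine pvMapFoldInv s (PySem.List.enumerate s 0) PySem.Dict.empty ?_ (by simp [PySem.Dict.get?, PySem.Dict.empty]) v j h
  intro p hp
  rw [PySem.List.mem_enumerate_iff] at hp
  obtain ⟨k, hk, rfl⟩ := hp
  exact ⟨k, by simp, hk, by simp [List.getD_eq_getElem?_getD, List.getElem?_eq_getElem hk]⟩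

-- membership of a getD value
theorem pvGetDMem (s : List Int) (k : Nat) (hk : k < s.length) : s.getD k 0 ∈ s := by
  rw [List.getD_eq_getElem?_getD, List.getElem?_eq_getElem hk, Option.getD_some]
  exact List.getElem_mem hk

-- monotonicity of a sorted list's entries
theorem pvMono (s : List Int) (hs : s.Pairwise (· ≤ ·)) (p r : Nat) (hpr : p ≤ r)
    (hr : r < s.length) : s.getD p 0 ≤ s.getD r 0 := by
  have hp' : p < s.length := by omega
  rw [List.getD_eq_getElem?_getD, List.getD_eq_getElem?_getD, List.getElem?_eq_getElem hr,
    List.getElem?_eq_getElem hp']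
  simp only [Option.getD_some]
  rcases Nat.eq_or_lt_of_le hpr with rfl | hlt
  · exact le_refl _
  · exact List.pairwise_iff_getElem.mp hs p r hp' hr hlt

-- two positions with the same value give count ≥ 2
theorem pvCountTwo (l : List Int) (p r : Nat) (v : Int) (hpr : p < r) (hr : r < l.length)
    (h1 : l.getD p 0 = v) (h2 : l.getD r 0 = v) : 2 ≤ l.count v := by
  have hp' : p < l.length := by omega
  rw [List.getD_eq_getElem?_getD, List.getElem?_eq_getElem hp', Option.getD_some] at h1
  rw [List.getD_eq_getElem?_getD, List.getElem?_eq_getElem hr, Option.getD_some] at h2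
  have hlt : p < (l.take r).length := by simp; omega
  have hv1 : v ∈ l.take r := by
    have : (l.take r)[p] = v := by rw [List.getElem_take]; exact h1
    exact this ▸ List.getElem_mem hlt
  have hv2 : v ∈ l.drop r := by
    have h0 : 0 < (l.drop r).length := by simp; omega
    have : (l.drop r)[0] = v := by rw [List.getElem_drop]; simpa using h2
    exact this ▸ List.getElem_mem h0
  have hc : l.count v = (l.take r).count v + (l.drop r).count v := by
    conv_lhs => rw [(List.take_append_drop r l).symm]
    exact List.count_append ..
  have c1 := List.count_pos_iff.mpr hv1
  have c2 := List.count_pos_iff.mpr hv2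
  omega

-- DEPENDENCY LEMMA: under Pre_ (transported to the sorted list s), every dict hit in the
-- inner loop, and the left factor itself, have a strictly smaller (|value|, index) key
theorem pvDep (s : List Int)
    (hp0 : (0 : Int) ∈ s → s.length ≤ 1)
    (hp1 : (1 : Int) ∈ s → s.count 1 = 1 ∧ (∀ x ∈ s, x ≤ 1) ∧ s.count (-1) ≤ 1)
    (hs : s.Pairwise (· ≤ ·)) (i left : Nat) (j : Int)
    (hi : i < s.length) (hl : left < i)
    (hmod : PySem.Int.mod (s.getD i 0) (s.getD left 0) = 0)
    (hj : (pvIndexMapA s).get? (PySem.Int.floordiv (s.getD i 0) (s.getD left 0)) = some j) :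
    ∃ k : Nat, j = (k : Int) ∧ k < s.length ∧
      pvKey s k < pvKey s i ∧ pvKey s left < pvKey s i := by
  set a := s.getD i 0 with ha
  set d0 := s.getD left 0 with hd0
  have hl' : left < s.length := by omega
  have hlen2 : 2 ≤ s.length := by omega
  have hamem : a ∈ s := pvGetDMem s i hi
  have hdmem : d0 ∈ s := pvGetDMem s left hl'
  have hane : a ≠ 0 := fun h => by have := hp0 (h ▸ hamem); omega
  have hdne : d0 ≠ 0 := fun h => by have := hp0 (h ▸ hdmem); omega
  have hdvd : d0 ∣ a := (PySem.Int.mod_eq_zero_iff_dvd a d0).mp hmod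
  have hdabs : d0.natAbs ≤ a.natAbs :=
    Nat.le_of_dvd (Int.natAbs_pos.mpr hane) (Int.natAbs_dvd_natAbs.mpr hdvd)
  have hkeyl : pvKey s left < pvKey s i := by
    rw [pvKey, pvKey, Prod.Lex.lt_iff]
    simp only [ofLex_toLex]
    rcases Nat.lt_or_ge d0.natAbs a.natAbs with h | h
    · exact Or.inl h
    · exact Or.inr ⟨by omega, hl⟩
  set q := PySem.Int.floordiv a d0 with hq
  obtain ⟨k, rfl, hk, hkv⟩ := pvIndexMapA_sound s _ j hj
  refine ⟨k, rfl, hk, ?_, hkeyl⟩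
  have hqd : q * d0 = a := by
    have h2 := PySem.Int.floordiv_mul_add_mod a d0
    rw [hmod, ← hq] at h2; omega
  have hqabs : q.natAbs * d0.natAbs = a.natAbs := by rw [← Int.natAbs_mul, hqd]
  have hqle : q.natAbs ≤ a.natAbs := by
    have : 1 ≤ d0.natAbs := Int.natAbs_pos.mpr hdne
    nlinarith
  rcases Nat.lt_or_ge q.natAbs a.natAbs with hqlt | hqge
  · rw [pvKey, pvKey, Prod.Lex.lt_iff]
    simp only [ofLex_toLex]
    exact Or.inl (by rw [hkv]; exact hqlt)
  · -- |q| = |a|, hence |d0| = 1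
    have hqeq : q.natAbs = a.natAbs := by omega
    have hd1 : d0.natAbs = 1 := by
      have hapos : 0 < a.natAbs := Int.natAbs_pos.mpr hane
      nlinarith
    rcases Int.natAbs_eq_iff.mp hd1 with hdp | hdm
    · -- d0 = 1: forces two 1s in s, excluded by Pre_
      exfalso
      simp only [Nat.cast_one] at hdp
      obtain ⟨hc1, hle1, -⟩ := hp1 (hdp ▸ hdmem)
      have h1a : (1 : Int) ≤ a := by
        have := pvMono s hs left i (by omega) hi
        rw [← ha, ← hd0, hdp] at this; exact this
      have ha1 : a = 1 := le_antisymm (hle1 a hamem) h1a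
      have := pvCountTwo s left i 1 hl hi (by rw [← hd0]; exact hdp) (by rw [← ha]; exact ha1)
      omega
    · -- d0 = -1, so q = -a
      simp only [Nat.cast_one] at hdm
      have hqna : q = -a := by
        have : q * d0 = a := hqd
        rw [hdm] at this; omega
      by_cases ha1 : a = -1
      · -- two -1s together with a 1 in s: excluded by Pre_
        exfalso
        have hq1 : q = 1 := by omega
        have h1mem : (1 : Int) ∈ s := by rw [← hq1, ← hkv]; exact pvGetDMem s k hk
        obtain ⟨-, -, hcm1⟩ := hp1 h1mem
        have := pvCountTwo s left i (-1) hl hi (by rw [← hd0]; exact hdm) (by rw [← ha]; exact ha1)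
        omega
      · rcases lt_trichotomy a 0 with haneg | hz | hapos
        · -- a ≤ -2 while s[left] = -1 ≤ s[i] = a: impossible in a sorted list
          exfalso
          have := pvMono s hs left i (by omega) hi
          rw [← ha, ← hd0, hdm] at this
          omega
        · exact absurd hz hane
        · -- a > 0: s[k] = -a < a = s[i], so k < i
          have hki : k < i := by
            by_contra hcon
            have := pvMono s hs i k (by omega) hk
            rw [← ha, hkv, hqna] at this
            omega
          rw [pvKey, pvKey, Prod.Lex.lt_iff]
          simp only [ofLex_toLex]
          refine Or.inr ⟨?_, hki⟩
          rw [hkv, hqna, Int.natAbs_neg]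

-- ---- B's fold, cut at position p ----
def pvDpAt (s : List Int) (m : PySem.Dict Int Int) (o : List Nat) (n p : Nat) : List Int :=
  (o.take p).foldl (fun dp i => dp.set i (pvCurB s m dp i)) (List.replicate n 1)

theorem pvRunLen (s : List Int) (m : PySem.Dict Int Int) (l : List Nat) (init : List Int) :
    (l.foldl (fun dp i => dp.set i (pvCurB s m dp i)) init).length = init.length := by
  induction l generalizing init with
  | nil => rfl
  | cons x t ih => simp [List.foldl_cons, ih]

theorem pvDpAt_length (s : List Int) (m : PySem.Dict Int Int) (o : List Nat) (n p : Nat) :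
    (pvDpAt s m o n p).length = n := by
  rw [pvDpAt, pvRunLen, List.length_replicate]

theorem pvDpAt_succ (s : List Int) (m : PySem.Dict Int Int) (o : List Nat) (n p : Nat)
    (hp : p < o.length) :
    pvDpAt s m o n (p + 1)
      = (pvDpAt s m o n p).set o[p] (pvCurB s m (pvDpAt s m o n p) o[p]) := by
  rw [pvDpAt, pvDpAt, List.take_add_one, List.getElem?_eq_getElem hp]
  simp only [Option.toList_some, List.foldl_append, List.foldl_cons, List.foldl_nil]

theorem pvGetDSetNe (l : List Int) (i k : Nat) (v : Int) (h : i ≠ k) :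
    (l.set i v).getD k 0 = l.getD k 0 := by
  rw [List.getD_eq_getElem?_getD, List.getD_eq_getElem?_getD, List.getElem?_set_ne h]

theorem pvGetDSetSelf (l : List Int) (i : Nat) (v : Int) (h : i < l.length) :
    (l.set i v).getD i 0 = v := by
  rw [List.getD_eq_getElem?_getD, List.getElem?_set_self h, Option.getD_some]

-- entry o[p'] is stable from step p'+1 on
theorem pvDpAt_stable (s : List Int) (m : PySem.Dict Int Int) (o : List Nat) (n : Nat)
    (hnd : o.Nodup) (p' p : Nat) (hp' : p' < p) (hp : p ≤ o.length) :
    (pvDpAt s m o n p).getD (o[p']'(by omega)) 0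
      = (pvDpAt s m o n (p' + 1)).getD (o[p']'(by omega)) 0 := by
  induction p with
  | zero => omega
  | succ p ih =>
    rcases Nat.lt_or_ge p' p with hlt | hge
    · rw [pvDpAt_succ s m o n p (by omega), pvGetDSetNe]
      · exact ih hlt (by omega)
      · intro hcon
        have := List.Nodup.getElem_inj_iff hnd (i := p) (j := p') |>.mp hcon
        omega
    · have : p' = p := by omega
      subst this; rfl

-- a processed entry already holds its final value
theorem pvDpAt_final (s : List Int) (m : PySem.Dict Int Int) (o : List Nat) (n : Nat)
    (hnd : o.Nodup) (p' p : Nat) (hp' : p' < p) (hp : p ≤ o.length) :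
    (pvDpAt s m o n p).getD (o[p']'(by omega)) 0
      = (pvDpAt s m o n o.length).getD (o[p']'(by omega)) 0 := by
  rw [pvDpAt_stable s m o n hnd p' p hp' hp,
    pvDpAt_stable s m o n hnd p' o.length (by omega) (le_refl _)]

-- a key strictly below o[p]'s key was processed strictly before p
theorem pvPosOf (s : List Int) (o : List Nat) (n : Nat)
    (hperm : o.Perm (List.range n))
    (hpair : o.Pairwise (fun a b => pvKey s a < pvKey s b))
    (p : Nat) (hp : p < o.length) (k : Nat) (hk : k < n)
    (hklt : pvKey s k < pvKey s (o[p])) :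
    ∃ p', ∃ h : p' < p, o[p']'(by omega) = k := by
  have hmem : k ∈ o := hperm.mem_iff.mpr (List.mem_range.mpr hk)
  obtain ⟨p', hp'len, hp'eq⟩ := List.mem_iff_getElem.mp hmem
  rcases lt_trichotomy p' p with h | h | h
  · exact ⟨p', h, hp'eq⟩
  · subst h; rw [hp'eq] at hklt; exact absurd hklt (lt_irrefl _)
  · exfalso
    have := List.pairwise_iff_getElem.mp hpair p p' hp hp'len h
    rw [hp'eq] at this
    exact absurd hklt (lt_asymm this)

-- cur stays in [0, MOD)
theorem pvCurB_range (s : List Int) (m : PySem.Dict Int Int) (dp : List Int) (i : Nat) :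
    0 ≤ pvCurB s m dp i ∧ pvCurB s m dp i < pvModB := by
  unfold pvCurB
  have hM : (0 : Int) < pvModB := by norm_num [pvModB]
  suffices h : ∀ (l : List Nat) (acc : Int), 0 ≤ acc → acc < pvModB →
      0 ≤ l.foldl (fun cur left =>
        if PySem.Int.mod (pvAtB s i) (pvAtB s left) = 0 then
          match PySem.Dict.get? m (PySem.Int.floordiv (pvAtB s i) (pvAtB s left)) with
          | some j => PySem.Int.mod (cur + pvAtB dp left * pvAtB dp j.toNat) pvModB
          | none => cur
        else cur) acc ∧ l.foldl (fun cur left =>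
        if PySem.Int.mod (pvAtB s i) (pvAtB s left) = 0 then
          match PySem.Dict.get? m (PySem.Int.floordiv (pvAtB s i) (pvAtB s left)) with
          | some j => PySem.Int.mod (cur + pvAtB dp left * pvAtB dp j.toNat) pvModB
          | none => cur
        else cur) acc < pvModB by
    exact h (List.range i) 1 (by norm_num) (by norm_num [pvModB])
  intro l
  induction l with
  | nil => intro acc h0 h1; exact ⟨h0, h1⟩
  | cons x t ih =>
    intro acc h0 h1
    simp only [List.foldl_cons]
    apply ih
    · split_ifs with hc
      · cases PySem.Dict.get? m (PySem.Int.floordiv (pvAtB s i) (pvAtB s x)) with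
        | none => exact h0
        | some j => exact PySem.Int.mod_nonneg _ hM
      · exact h0
    · split_ifs with hc
      · cases PySem.Dict.get? m (PySem.Int.floordiv (pvAtB s i) (pvAtB s x)) with
        | none => exact h1
        | some j => exact PySem.Int.mod_lt _ hM
      · exact h1

-- pvCurB reads dp only at positions with strictly smaller key
theorem pvCurAgree (s : List Int)
    (hp0 : (0 : Int) ∈ s → s.length ≤ 1)
    (hp1 : (1 : Int) ∈ s → s.count 1 = 1 ∧ (∀ x ∈ s, x ≤ 1) ∧ s.count (-1) ≤ 1)
    (hs : s.Pairwise (· ≤ ·)) (i : Nat) (hi : i < s.length) (dp1 dp2 : List Int)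
    (hagree : ∀ k : Nat, k < s.length → pvKey s k < pvKey s i →
      dp1.getD k 0 = dp2.getD k 0) :
    pvCurB s (pvIndexMapA s) dp1 i = pvCurB s (pvIndexMapA s) dp2 i := by
  unfold pvCurB
  apply PySem.List.foldl_congr_mem'
  intro left hleft acc
  have hlefti : left < i := List.mem_range.mp hleft
  simp only [pvAtB]
  split_ifs with hc
  · cases hjm : PySem.Dict.get? (pvIndexMapA s) (PySem.Int.floordiv (s.getD i 0) (s.getD left 0)) with
    | none => rfl
    | some j =>
      obtain ⟨k, hjk, hk, hkk, hkl⟩ := pvDep s hp0 hp1 hs i left j hi hlefti hc hjm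
      rw [hjk]
      simp only [Int.toNat_natCast, hagree left (by omega) hkl, hagree k hk hkk]
  · rfl

-- MAIN LEMMA: A's recursion computes exactly the final entries of B's dp array
theorem pvMainB (s : List Int) (o : List Nat)
    (hp0 : (0 : Int) ∈ s → s.length ≤ 1)
    (hp1 : (1 : Int) ∈ s → s.count 1 = 1 ∧ (∀ x ∈ s, x ≤ 1) ∧ s.count (-1) ≤ 1)
    (hs : s.Pairwise (· ≤ ·))
    (ho : o = pvOrderB s s.length) :
    ∀ p, ∀ hp : p < o.length, ∀ fuel : Nat, p < fuel →
      pvDfsA s (pvIndexMapA s) fuel (o[p])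
        = (pvDpAt s (pvIndexMapA s) o s.length o.length).getD (o[p]) 0 := by
  have hperm : o.Perm (List.range s.length) := by
    rw [ho, pvOrderB_eq_sorted]; exact PySem.List.sorted_perm ..
  have hle : o.Pairwise (fun a b => pvKey s a ≤ pvKey s b) := by
    rw [ho, pvOrderB_eq_sorted]; exact PySem.List.sorted_pairwise ..
  have hnd : o.Nodup := (hperm.nodup_iff).mpr List.nodup_range
  have hpair : o.Pairwise (fun a b => pvKey s a < pvKey s b) := by
    refine (hle.and hnd).imp ?_
    rintro a b ⟨h1, h2⟩
    refine lt_of_le_of_ne h1 (fun he => h2 ?_)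
    have := congrArg (fun x => (ofLex x).2) he
    simpa [pvKey] using this
  have hoin : ∀ p, ∀ hp : p < o.length, (o[p]'hp) < s.length := by
    intro p hp
    have : (o[p]'hp) ∈ List.range s.length := hperm.mem_iff.mp (List.getElem_mem hp)
    exact List.mem_range.mp this
  intro p
  induction p using Nat.strong_induction_on with
  | _ p ih =>
    intro hp fuel hf
    obtain ⟨f, rfl⟩ : ∃ f, fuel = f + 1 := ⟨fuel - 1, by omega⟩
    have hi : (o[p]'hp) < s.length := hoin p hp
    -- the dp entries already written agree with the final array below o[p]'s key
    have hagree : ∀ k : Nat, k < s.length → pvKey s k < pvKey s (o[p]'hp) →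
        (pvDpAt s (pvIndexMapA s) o s.length p).getD k 0
          = (pvDpAt s (pvIndexMapA s) o s.length o.length).getD k 0 := by
      intro k hk hklt
      obtain ⟨pk, hpk, hpke⟩ := pvPosOf s o s.length hperm hpair p hp k hk hklt
      rw [← hpke]
      exact pvDpAt_final s (pvIndexMapA s) o s.length hnd pk p hpk (by omega)
    -- the final entry at o[p] is B's inner loop over the final array
    have hR : (pvDpAt s (pvIndexMapA s) o s.length o.length).getD (o[p]'hp) 0
        = pvCurB s (pvIndexMapA s) (pvDpAt s (pvIndexMapA s) o s.length o.length) (o[p]'hp) := by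
      rw [← pvDpAt_final s (pvIndexMapA s) o s.length hnd p (p + 1) (by omega) (by omega),
        pvDpAt_succ s (pvIndexMapA s) o s.length p hp,
        pvGetDSetSelf _ _ _ (by rw [pvDpAt_length]; exact hi)]
      exact pvCurAgree s hp0 hp1 hs (o[p]'hp) hi _ _ hagree
    rw [hR]
    -- A's one recursion step is the same loop, by the induction hypothesis
    show PySem.Int.mod _ pvMOD = _
    have hcong : (List.range (o[p]'hp)).foldl (fun res left =>
        if PySem.Int.mod (pvGetA s (o[p]'hp)) (pvGetA s left) = 0 then
          match PySem.Dict.get? (pvIndexMapA s) (PySem.Int.floordiv (pvGetA s (o[p]'hp)) (pvGetA s left)) with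
          | some j => PySem.Int.mod (res + pvDfsA s (pvIndexMapA s) f j.toNat * pvDfsA s (pvIndexMapA s) f left) pvMOD
          | none => res
        else res) 1
        = pvCurB s (pvIndexMapA s) (pvDpAt s (pvIndexMapA s) o s.length o.length) (o[p]'hp) := by
      unfold pvCurB
      apply PySem.List.foldl_congr_mem'
      intro left hleft acc
      have hlefti : left < (o[p]'hp) := List.mem_range.mp hleft
      simp only [pvGetA, pvAtB]
      split_ifs with hc
      · cases hjm : PySem.Dict.get? (pvIndexMapA s) (PySem.Int.floordiv (s.getD (o[p]'hp) 0) (s.getD left 0)) with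
        | none => rfl
        | some j =>
          obtain ⟨k, hjk, hk, hkk, hkl⟩ := pvDep s hp0 hp1 hs (o[p]'hp) left j hi hlefti hc hjm
          obtain ⟨pl, hpl, hple⟩ := pvPosOf s o s.length hperm hpair p hp left (by omega) hkl
          obtain ⟨pk, hpk, hpke⟩ := pvPosOf s o s.length hperm hpair p hp k hk hkk
          have e1 : pvDfsA s (pvIndexMapA s) f left
              = (pvDpAt s (pvIndexMapA s) o s.length o.length).getD left 0 := by
            rw [← hple]; exact ih pl hpl (by omega) f (by omega)
          have e2 : pvDfsA s (pvIndexMapA s) f k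
              = (pvDpAt s (pvIndexMapA s) o s.length o.length).getD k 0 := by
            rw [← hpke]; exact ih pk hpk (by omega) f (by omega)
          rw [hjk]
          simp only [Int.toNat_natCast, e1, e2]
          congr 1
          ring
      · rfl
    simp only [hcong]
    have hr := pvCurB_range s (pvIndexMapA s) (pvDpAt s (pvIndexMapA s) o s.length o.length) (o[p]'hp)
    have hM : (0 : Int) < pvMOD := by norm_num [pvMOD]
    rw [PySem.Int.mod_eq_emod_of_pos hM]
    exact Int.emod_eq_of_lt hr.1 (by simpa [pvMOD, pvModB] using hr.2)

-- ===== VERDICT (by name: the statement is the Claim_ definition above) =====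
theorem numFactoredBinaryTrees2_spec : Claim_equal_numFactoredBinaryTrees2 := by
  unfold Claim_equal_numFactoredBinaryTrees2
  intro arr _ hpre
  unfold Spec_numFactoredBinaryTrees2
  simp only [numFactoredBinaryTrees2, numFactoredBinaryTrees2_alt]
  have hmap : pvIndexMapB = pvIndexMapA := rfl
  rw [hmap]
  set s := PySem.List.sorted arr (fun x => x) false with hsdef
  have hlen : s.length = arr.length := PySem.List.length_sorted ..
  have hperm : s.Perm arr := PySem.List.sorted_perm ..
  have hp0 : (0 : Int) ∈ s → s.length ≤ 1 := by
    intro h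
    rw [hperm.length_eq]
    exact hpre.1 (hperm.mem_iff.mp h)
  have hp1 : (1 : Int) ∈ s → s.count 1 = 1 ∧ (∀ x ∈ s, x ≤ 1) ∧ s.count (-1) ≤ 1 := by
    intro h
    obtain ⟨hc1, hle, hcm⟩ := hpre.2 (hperm.mem_iff.mp h)
    exact ⟨by rw [hperm.count_eq]; exact hc1,
      fun x hx => hle x (hperm.mem_iff.mp hx),
      by rw [hperm.count_eq]; exact hcm⟩
  have hs : s.Pairwise (· ≤ ·) := by
    simpa using PySem.List.sorted_pairwise arr (fun x => x)
  set o := pvOrderB s arr.length with hodef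
  have ho : o = pvOrderB s s.length := by rw [hodef, hlen]
  have hoperm : o.Perm (List.range s.length) := by
    rw [ho, pvOrderB_eq_sorted]; exact PySem.List.sorted_perm ..
  have holen : o.length = arr.length := by rw [hoperm.length_eq, List.length_range, hlen]
  -- B's fold is pvDpAt cut at the full length
  have hBfold : o.foldl (fun dp i => dp.set i (pvCurB s (pvIndexMapA s) dp i)) (List.replicate arr.length 1)
      = pvDpAt s (pvIndexMapA s) o s.length o.length := by
    rw [pvDpAt, List.take_length, hlen]
  -- A's summands are the final dp entries
  have hsum : (List.range arr.length).foldl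
        (fun acc i => acc + pvDfsA s (pvIndexMapA s) arr.length i) 0
      = (List.range arr.length).foldl
        (fun acc i => acc + (pvDpAt s (pvIndexMapA s) o s.length o.length).getD i 0) 0 := by
    apply PySem.List.foldl_congr_mem'
    intro i hi acc
    have hi' : i ∈ o := hoperm.mem_iff.mpr (by rw [hlen]; exact hi)
    obtain ⟨p, hplen, hpe⟩ := List.mem_iff_getElem.mp hi'
    rw [← hpe, pvMainB s o hp0 hp1 hs ho p hplen arr.length (by omega)]
  rw [hsum]
  -- the indexed sum over range n is the fold over the dp list itself
  have hmapdp : (List.range arr.length).map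
      (fun i => (pvDpAt s (pvIndexMapA s) o s.length o.length).getD i 0)
      = pvDpAt s (pvIndexMapA s) o s.length o.length := by
    apply List.ext_getElem
    · simp [pvDpAt_length, hlen]
    · intro idx h1 h2
      simp only [List.getElem_map, List.getElem_range, List.getD_eq_getElem?_getD,
        List.getElem?_eq_getElem h2, Option.getD_some]
  rw [PySem.List.foldl_add (g := fun i => (pvDpAt s (pvIndexMapA s) o s.length o.length).getD i 0),
    hmapdp, PySem.List.foldl_add (g := fun x => x), hBfold, List.map_id']
  rfl
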